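-- pv_equiv track=rewrite | github.com/BM-27-DR/Marix_based_parity_method_for_error_and_detection | memory.py | encode_entire_file_hamming
-- ===== SOURCE A (Python) =====
-- def calculate_parity_bits(data_bits):
--     p1 = data_bits[0] ^ data_bits[1] ^ data_bits[3]
--     p2 = data_bits[0] ^ data_bits[2] ^ data_bits[3]
--     p3 = data_bits[1] ^ data_bits[2] ^ data_bits[3]
--     return [p1, p2, p3]
--
-- def encode_hamming(data_bits):
--     p1, p2, p3 = calculate_parity_bits(data_bits)
--     hamming_code = [p1, p2, data_bits[0], p3, data_bits[1], data_bits[2], data_bits[3]]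
--     return hamming_code
--
-- def encode_entire_file_hamming(data_bits):
--     encoded_hamming_codes = []
--     for i in range(0, len(data_bits), 4):
--         chunk = data_bits[i:i + 4]
--         if len(chunk) < 4:
--             chunk = chunk + [0] * (4 - len(chunk))  # Pad with zeros
--         encoded = encode_hamming(chunk)
--         encoded_hamming_codes.append(encoded)
--     return encoded_hamming_codes
-- ===== SOURCE B (Python) =====
-- # Hamming(7,4) generator matrix: rows give, in output order p1,p2,d0,p3,d1,d2,d3,
-- # which data bits of the chunk are XORed into each codeword position.
-- G = [
--     [1, 1, 0, 1],  # p1 = d0 ^ d1 ^ d3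
--     [1, 0, 1, 1],  # p2 = d0 ^ d2 ^ d3
--     [1, 0, 0, 0],  # d0
--     [0, 1, 1, 1],  # p3 = d1 ^ d2 ^ d3
--     [0, 1, 0, 0],  # d1
--     [0, 0, 1, 0],  # d2
--     [0, 0, 0, 1],  # d3
-- ]
--
-- def encode_entire_file_hamming(data_bits):
--     out = []
--     rest = iter(data_bits)
--     while True:
--         chunk = [bit for _, bit in zip(range(4), rest)]  # consume up to 4 bits
--         if not chunk:
--             break
--         chunk = (chunk + [0, 0, 0, 0])[:4]  # zero-pad the last chunk
--         codeword = []
--         for row in G: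
--             acc = 0
--             for sel, bit in zip(row, chunk):
--                 if sel:
--                     acc ^= bit
--             codeword.append(acc)
--         out.append(codeword)
--     return out
-- ===== Notes on version B (the rewrite author's own statement) =====
-- stated objective: alternative
-- what changed: Replaced A's hard-coded per-position parity XOR formulas and index-range chunking by a table-driven Hamming(7,4) generator-matrix product over GF(2) (XOR-reducing each matrix row against the chunk) with list-consuming rest=rest[4:] chunking and uniform take-of-append zero padding.
import Mathlib
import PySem

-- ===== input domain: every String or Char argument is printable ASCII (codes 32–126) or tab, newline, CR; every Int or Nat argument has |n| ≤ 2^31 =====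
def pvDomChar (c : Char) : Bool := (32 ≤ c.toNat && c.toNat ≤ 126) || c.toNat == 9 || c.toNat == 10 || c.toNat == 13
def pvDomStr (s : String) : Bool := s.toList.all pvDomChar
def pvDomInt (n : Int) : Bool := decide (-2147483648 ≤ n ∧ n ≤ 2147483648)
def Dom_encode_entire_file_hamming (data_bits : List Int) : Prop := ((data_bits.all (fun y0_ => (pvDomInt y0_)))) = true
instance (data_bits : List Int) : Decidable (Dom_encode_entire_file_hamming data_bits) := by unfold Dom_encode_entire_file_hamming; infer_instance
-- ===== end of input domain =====

-- B replaces A's hard-coded parity formulas and index loop by a generator-matrix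
-- (table-driven GF(2) matrix-vector) codeword computation over list-consuming chunking;
-- objective: alternative decomposition, same cost.

-- ===== PORT A =====
def calculate_parity_bits (data_bits : List Int) : List Int :=
  let p1 := PySem.Int.bxor (PySem.Int.bxor (PySem.List.pyGetD data_bits 0 0) (PySem.List.pyGetD data_bits 1 0)) (PySem.List.pyGetD data_bits 3 0)
  let p2 := PySem.Int.bxor (PySem.Int.bxor (PySem.List.pyGetD data_bits 0 0) (PySem.List.pyGetD data_bits 2 0)) (PySem.List.pyGetD data_bits 3 0)
  let p3 := PySem.Int.bxor (PySem.Int.bxor (PySem.List.pyGetD data_bits 1 0) (PySem.List.pyGetD data_bits 2 0)) (PySem.List.pyGetD data_bits 3 0)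
  [p1, p2, p3]

def encode_hamming (data_bits : List Int) : List Int :=
  match calculate_parity_bits data_bits with
  | [p1, p2, p3] =>
      [p1, p2, PySem.List.pyGetD data_bits 0 0, p3, PySem.List.pyGetD data_bits 1 0,
       PySem.List.pyGetD data_bits 2 0, PySem.List.pyGetD data_bits 3 0]
  | _ => []   -- unreachable: calculate_parity_bits always returns 3 elements

def encode_entire_file_hamming (data_bits : List Int) : List (List Int) :=
  (PySem.List.pyRange 0 data_bits.length 4).foldl
    (fun acc i =>
      let chunk := PySem.List.slice data_bits (some i) (some (i + 4))
      let chunk := if chunk.length < 4 then chunk ++ List.replicate (4 - chunk.length) 0 else chunk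
      acc ++ [encode_hamming chunk]) []

-- ===== PORT B =====
def pvG : List (List Int) :=
  [[1, 1, 0, 1], [1, 0, 1, 1], [1, 0, 0, 0], [0, 1, 1, 1], [0, 1, 0, 0], [0, 0, 1, 0], [0, 0, 0, 1]]

def pvCodeword (chunk : List Int) : List Int :=
  pvG.map (fun row =>
    (row.zip chunk).foldl (fun acc p => if p.1 ≠ 0 then PySem.Int.bxor acc p.2 else acc) 0)

def encode_entire_file_hamming_alt (data_bits : List Int) : List (List Int) :=
  if h : data_bits = [] then []
  else
    pvCodeword ((data_bits.take 4 ++ [0, 0, 0, 0]).take 4) ::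
      encode_entire_file_hamming_alt (data_bits.drop 4)
termination_by data_bits.length
decreasing_by
  simp only [List.length_drop]
  have : data_bits.length ≠ 0 := fun hl => h (List.eq_nil_of_length_eq_zero hl)
  omega

-- ===== PRECONDITION & SPEC =====
def Spec_encode_entire_file_hamming (data_bits : List Int) (out : List (List Int)) : Prop := out = encode_entire_file_hamming_alt data_bits
instance (data_bits : List Int) (out : List (List Int)) : Decidable (Spec_encode_entire_file_hamming data_bits out) := by unfold Spec_encode_entire_file_hamming; infer_instance

-- ===== CLAIM (what is proved, stated in full; the proofs are below) =====
def Claim_equal_encode_entire_file_hamming : Prop := ∀ (data_bits : List Int), Dom_encode_entire_file_hamming data_bits → Spec_encode_entire_file_hamming data_bits (encode_entire_file_hamming data_bits)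

-- ===== LEMMAS AND PROOFS =====

theorem pv_zero_bxor (a : Int) : PySem.Int.bxor 0 a = a := by
  rw [PySem.Int.bxor_comm, PySem.Int.bxor_zero]

-- the two per-chunk codeword computations agree on length-4 chunks
theorem pv_codeword_eq (c : List Int) (h : c.length = 4) : encode_hamming c = pvCodeword c := by
  match c, h with
  | [a, b, cc, d], _ =>
    simp [encode_hamming, calculate_parity_bits, pvCodeword, pvG, List.zip,
      PySem.List.pyGetD, PySem.List.pyGet?, PySem.List.pyIdx?, pv_zero_bxor]

theorem pv_padded_len (xs : List Int) : ((xs.take 4 ++ [0, 0, 0, 0]).take 4).length = 4 := by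
  simp

theorem pv_slice_take (xs : List Int) : PySem.List.slice xs (some (0 : Int)) (some ((0 : Int) + 4)) = xs.take 4 := by
  rw [PySem.List.slice_toNat xs (by norm_num) (by norm_num)]
  simp

-- A's zero-padding of the head chunk equals B's take-of-append padding
theorem pv_pad_eq (xs : List Int) :
    (if (xs.take 4).length < 4 then xs.take 4 ++ List.replicate (4 - (xs.take 4).length) 0
     else xs.take 4) = (xs.take 4 ++ [0, 0, 0, 0]).take 4 := by
  have ht : (xs.take 4).length ≤ 4 := by simp
  have hr : ((xs.take 4 ++ [0, 0, 0, 0]).take 4)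
      = xs.take 4 ++ List.replicate (4 - (xs.take 4).length) 0 := by
    rw [show ([0, 0, 0, 0] : List Int) = List.replicate 4 0 from rfl, List.take_append,
        List.take_of_length_le ht, List.take_replicate]
    congr 2
    omega
  rw [hr]
  split_ifs with h
  · rfl
  · have h0 : 4 - (xs.take 4).length = 0 := by omega
    rw [h0, List.replicate_zero, List.append_nil]

-- unfold A's foldl with list-append accumulator into a map
theorem pv_foldl_app (g : Int → List Int) (l : List Int) (acc : List (List Int)) :
    l.foldl (fun acc i => acc ++ [g i]) acc = acc ++ l.map g := by
  induction l generalizing acc with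
  | nil => simp
  | cons x t ih => simp [ih]

theorem pv_A_map (xs : List Int) :
    encode_entire_file_hamming xs
      = (PySem.List.pyRange 0 xs.length 4).map (fun i =>
          encode_hamming
            (if (PySem.List.slice xs (some i) (some (i + 4))).length < 4 then
              PySem.List.slice xs (some i) (some (i + 4))
                ++ List.replicate (4 - (PySem.List.slice xs (some i) (some (i + 4))).length) 0
             else PySem.List.slice xs (some i) (some (i + 4)))) := by
  rw [encode_entire_file_hamming]
  exact (pv_foldl_app _ _ []).trans (by simp)

-- head-split of A's stride-4 index range
theorem pv_range_split (n : Int) (hn : 0 < n) :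
    PySem.List.pyRange 0 n 4 = (0 : Int) :: (PySem.List.pyRange 0 (n - 4) 4).map (· + 4) := by
  rw [PySem.List.pyRange_of_pos 0 n (by norm_num), PySem.List.pyRange_of_pos 0 (n - 4) (by norm_num)]
  have hR : (if (0 : Int) < n - 4 then ((n - 4 - 0 + 4 - 1) / 4).toNat else 0)
      = ((n - 4 - 0 + 4 - 1) / 4).toNat := by
    split_ifs with h2
    · rfl
    · have he : n - 4 - 0 + 4 - 1 = n - 1 := by ring
      rw [he]
      omega
  have h4 : ((n - 0 + 4 - 1) / 4).toNat = ((n - 4 - 0 + 4 - 1) / 4).toNat + 1 := by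
    have e1 : n - 0 + 4 - 1 = n + 3 := by ring
    have e2 : n - 4 - 0 + 4 - 1 = n - 1 := by ring
    rw [e1, e2]
    omega
  rw [if_pos hn, hR, h4, List.range_succ_eq_map, List.map_cons, List.map_map, List.map_map]
  refine List.cons_eq_cons.mpr ⟨by norm_num, ?_⟩
  · apply List.map_congr_left
    intro k _
    simp only [Function.comp]
    push_cast
    ring

-- the tail range over n-4 is the range over the dropped list's length
theorem pv_range_drop (xs : List Int) :
    PySem.List.pyRange 0 ((xs.length : Int) - 4) 4 = PySem.List.pyRange 0 ((xs.drop 4).length : Int) 4 := by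
  by_cases h : xs.length ≤ 4
  · have h1 : ¬ (0 : Int) < (xs.length : Int) - 4 := by omega
    have h2 : (xs.drop 4).length = 0 := by simp; omega
    rw [PySem.List.pyRange_of_pos _ _ (by norm_num : (0:Int) < 4),
        PySem.List.pyRange_of_pos _ _ (by norm_num : (0:Int) < 4), if_neg h1, h2]
    norm_num
  · congr 1
    simp only [List.length_drop]
    omega

-- shifting the slice index by 4 is slicing the dropped list
theorem pv_slice_shift (xs : List Int) (i : Int) (hi : 0 ≤ i) :
    PySem.List.slice xs (some (i + 4)) (some (i + 4 + 4))
      = PySem.List.slice (xs.drop 4) (some i) (some (i + 4)) := by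
  rw [PySem.List.slice_toNat xs (by omega) (by omega),
      PySem.List.slice_toNat (xs.drop 4) hi (by omega), List.drop_drop]
  congr 1
  · omega
  · congr 1
    omega

theorem pv_main (xs : List Int) : encode_entire_file_hamming xs = encode_entire_file_hamming_alt xs := by
  by_cases hx : xs = []
  · subst hx
    rw [pv_A_map, encode_entire_file_hamming_alt]
    simp [PySem.List.pyRange]
  · have hn : 0 < ((xs.length : Int)) := by
      have : xs.length ≠ 0 := fun hl => hx (List.eq_nil_of_length_eq_zero hl)
      omega
    rw [pv_A_map, pv_range_split _ hn, List.map_cons, List.map_map,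
        encode_entire_file_hamming_alt]
    rw [dif_neg hx]
    congr 1
    · rw [pv_slice_take, pv_pad_eq, pv_codeword_eq _ (pv_padded_len xs)]
    · rw [pv_range_drop]
      have ih := pv_main (xs.drop 4)
      rw [pv_A_map] at ih
      rw [← ih]
      apply List.map_congr_left
      intro i hi
      have hi0 : 0 ≤ i := by
        rcases (PySem.List.mem_pyRange_iff_of_pos (by norm_num) i).mp hi with ⟨h1, _, _⟩
        exact h1
      simp only [Function.comp]
      rw [pv_slice_shift xs i hi0]
termination_by xs.length
decreasing_by
  simp only [List.length_drop]
  have : xs.length ≠ 0 := fun hl => hx (List.eq_nil_of_length_eq_zero hl)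
  omega

-- ===== VERDICT (by name: the statement is the Claim_ definition above) =====
theorem encode_entire_file_hamming_spec : Claim_equal_encode_entire_file_hamming := by
  intro xs _
  unfold Spec_encode_entire_file_hamming
  exact pv_main xs
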